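-- pv_equiv track=rewrite | github.com/posl/comment_recommendation_v2 | script/mod_gen/2_time/en/33/1.py | numArithmeticSlices
-- ===== SOURCE A (Python) =====
-- def numArithmeticSlices(nums):
--     """
--     :type nums: List[int]
--     :rtype: int
--     """
--     n = len(nums)
--     dp = [{} for _ in range(n)]
--     count = 0
--     for i in range(n):
--         for j in range(i):
--             diff = nums[i] - nums[j]
--             dp[i][diff] = dp[i].get(diff, 0) + dp[j].get(diff, 0) + 1
--             count += dp[j].get(diff, 0)
--     return count
-- ===== SOURCE B (Python) =====
-- def numArithmeticSlices(nums):
--     """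
--     :type nums: List[int]
--     :rtype: int
--     """
--     count = 0
--     vals = {}   # distinct values seen so far -> multiplicity
--     weak = {}   # (value v, diff d) -> total number of weak (length >= 2) arithmetic
--                 # subsequences with common difference d ending at an earlier index holding value v
--     for x in nums:
--         for v, c in vals.items():
--             d = x - v
--             wv = weak.get((v, d), 0)
--             count += wv
--             weak[(x, d)] = weak.get((x, d), 0) + wv + c
--         vals[x] = vals.get(x, 0) + 1
--     return count
-- ===== Notes on version B (the rewrite author's own statement) =====
-- stated objective: alternative
-- what changed: B abandons A's per-index DP rows and the double index loop: it makes a single left-to-right pass keyed by VALUES, maintaining one dict of distinct seen values with multiplicities and one dict (value, diff) -> aggregated weak-subsequence count, so the inner iteration runs over distinct previous values instead of previous indices.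
import Mathlib
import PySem

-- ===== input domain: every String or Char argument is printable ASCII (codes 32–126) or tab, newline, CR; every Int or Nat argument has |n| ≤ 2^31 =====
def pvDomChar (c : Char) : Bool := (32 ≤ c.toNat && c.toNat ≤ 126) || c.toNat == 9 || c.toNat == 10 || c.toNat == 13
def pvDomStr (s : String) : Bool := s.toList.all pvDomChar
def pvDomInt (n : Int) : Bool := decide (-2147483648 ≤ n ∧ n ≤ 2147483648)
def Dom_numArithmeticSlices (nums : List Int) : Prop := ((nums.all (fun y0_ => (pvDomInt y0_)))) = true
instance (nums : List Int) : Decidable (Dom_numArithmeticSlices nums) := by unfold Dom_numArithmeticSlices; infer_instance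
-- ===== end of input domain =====

-- B replaces A's per-index DP rows and index-pair double loop by a single left-to-right pass
-- aggregated by VALUE: one dict of distinct seen values with multiplicities and one dict
-- (value, diff) -> total weak-subsequence count; alternative decomposition, same worst-case cost.


-- ===== PORT A =====
def numArithmeticSlices (nums : List Int) : Int :=
  let n : Int := nums.length
  let r := (PySem.List.pyRange 0 n 1).foldl
    (fun (st : List (PySem.Dict Int Int) × Int) (i : Int) =>
      let inner := (PySem.List.pyRange 0 i 1).foldl
        (fun (st2 : PySem.Dict Int Int × Int) (j : Int) =>
          let diff := PySem.List.pyGetD nums i 0 - PySem.List.pyGetD nums j 0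
          let djv := (PySem.List.pyGetD st.1 j PySem.Dict.empty).getD diff 0
          (st2.1.insert diff (st2.1.getD diff 0 + djv + 1), st2.2 + djv))
        (PySem.Dict.empty, st.2)
      (st.1 ++ [inner.1], inner.2))
    ([], 0)
  r.2

-- ===== PORT B =====
def numArithmeticSlices_alt (nums : List Int) : Int :=
  let r := nums.foldl
    (fun (st : Int × PySem.Dict Int Int × PySem.Dict (Int × Int) Int) (x : Int) =>
      let inner := st.2.1.items.foldl
        (fun (st2 : Int × PySem.Dict (Int × Int) Int) (vc : Int × Int) =>
          let d := x - vc.1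
          let wv := st2.2.getD (vc.1, d) 0
          (st2.1 + wv, st2.2.insert (x, d) (st2.2.getD (x, d) 0 + wv + vc.2)))
        (st.1, st.2.2)
      (inner.1, st.2.1.insert x (st.2.1.getD x 0 + 1), inner.2))
    (0, PySem.Dict.empty, PySem.Dict.empty)
  r.1

-- ===== PRECONDITION & SPEC =====
def Spec_numArithmeticSlices (nums : List Int) (out : Int) : Prop := out = numArithmeticSlices_alt nums
instance (nums : List Int) (out : Int) : Decidable (Spec_numArithmeticSlices nums out) := by unfold Spec_numArithmeticSlices; infer_instance

-- ===== CLAIM (what is proved, stated in full; the proofs are below) =====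
def Claim_equal_numArithmeticSlices : Prop := ∀ (nums : List Int), Dom_numArithmeticSlices nums → Spec_numArithmeticSlices nums (numArithmeticSlices nums)

-- ===== LEMMAS AND PROOFS =====

-- pvF nums i d = number of weak (length ≥ 2) arithmetic subsequences of nums with common
-- difference d ending at index i (the final value A's dp[i][d] holds, and what B aggregates).
def pvF (nums : List Int) (i : Nat) (d : Int) : Int :=
  ((List.range i).attach.map (fun j =>
    if nums.getD i 0 - nums.getD j.1 0 = d then pvF nums j.1 d + 1 else 0)).sum
termination_by i
decreasing_by exact List.mem_range.mp j.2

-- partial row: the same sum truncated at t, with the head value given explicitly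
def pvFP (nums : List Int) (xi : Int) (t : Nat) (d : Int) : Int :=
  ((List.range t).map (fun j => if xi - nums.getD j 0 = d then pvF nums j d + 1 else 0)).sum

-- B's weak-aggregate: total pvF over prefix indices holding value v
def pvW (nums : List Int) (t : Nat) (v : Int) (d : Int) : Int :=
  ((List.range t).map (fun j => if nums.getD j 0 = v then pvF nums j d else 0)).sum

-- multiplicity of value v in the prefix of length t
def pvC (nums : List Int) (t : Nat) (v : Int) : Int :=
  ((List.range t).map (fun j => if nums.getD j 0 = v then (1:Int) else 0)).sum

-- the shared count: A's running count after the first t outer iterations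
def pvCount (nums : List Int) (t : Nat) : Int :=
  ((List.range t).map (fun i =>
    ((List.range i).map (fun j => pvF nums j (nums.getD i 0 - nums.getD j 0))).sum)).sum

theorem pvF_eq (nums : List Int) (i : Nat) (d : Int) :
    pvF nums i d = pvFP nums (nums.getD i 0) i d := by
  rw [pvF, pvFP, List.map_attach_eq_pmap]
  congr 1
  simp

theorem pvFP_succ (nums : List Int) (xi : Int) (t : Nat) (d : Int) :
    pvFP nums xi (t+1) d
      = pvFP nums xi t d + (if xi - nums.getD t 0 = d then pvF nums t d + 1 else 0) := by
  rw [pvFP, pvFP, List.sum_range_succ]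

theorem pvW_succ (nums : List Int) (t : Nat) (v d : Int) :
    pvW nums (t+1) v d
      = pvW nums t v d + (if nums.getD t 0 = v then pvF nums t d else 0) := by
  rw [pvW, pvW, List.sum_range_succ]

theorem pvC_succ (nums : List Int) (t : Nat) (v : Int) :
    pvC nums (t+1) v = pvC nums t v + (if nums.getD t 0 = v then (1:Int) else 0) := by
  rw [pvC, pvC, List.sum_range_succ]

theorem pvCount_succ (nums : List Int) (t : Nat) :
    pvCount nums (t+1)
      = pvCount nums t
        + ((List.range t).map (fun j => pvF nums j (nums.getD t 0 - nums.getD j 0))).sum := by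
  rw [pvCount, pvCount, List.sum_range_succ]

-- a fold over pyRange(0, n) is a fold over List.range n through the cast
theorem pv_foldl_range_cast {α : Type} (f : α → Int → α) (init : α) (n : Nat) :
    (PySem.List.pyRange 0 (n : Int) 1).foldl f init
      = (List.range n).foldl (fun (st : α) (k : Nat) => f st (k : Int)) init := by
  induction n with
  | zero => simp [PySem.List.pyRange_one_eq_nil]
  | succ m ih =>
    rw [show ((m + 1 : Nat) : Int) = (m : Int) + 1 by push_cast; ring,
      PySem.List.pyRange_one_succ_right (by positivity : (0:Int) ≤ (m : Int)),
      List.foldl_append, List.range_succ, List.foldl_append, ih]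
    rfl

-- ========== A side ==========

-- A's inner-loop step and loops, with Nat indices
def pvStepA (nums : List Int) (rows : List (PySem.Dict Int Int)) (k : Nat)
    (st2 : PySem.Dict Int Int × Int) (j : Nat) : PySem.Dict Int Int × Int :=
  (st2.1.insert (nums.getD k 0 - nums.getD j 0)
     (st2.1.getD (nums.getD k 0 - nums.getD j 0) 0 +
       (rows.getD j PySem.Dict.empty).getD (nums.getD k 0 - nums.getD j 0) 0 + 1),
   st2.2 + (rows.getD j PySem.Dict.empty).getD (nums.getD k 0 - nums.getD j 0) 0)

def pvInnerA (nums : List Int) (rows : List (PySem.Dict Int Int)) (k t : Nat) (c0 : Int) :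
    PySem.Dict Int Int × Int :=
  (List.range t).foldl (pvStepA nums rows k) (PySem.Dict.empty, c0)

def pvFoldA (nums : List Int) (t : Nat) : List (PySem.Dict Int Int) × Int :=
  (List.range t).foldl
    (fun st k => (st.1 ++ [(pvInnerA nums st.1 k k st.2).1], (pvInnerA nums st.1 k k st.2).2))
    ([], 0)

theorem A_eq_foldA (nums : List Int) : numArithmeticSlices nums = (pvFoldA nums nums.length).2 := by
  simp only [numArithmeticSlices, pvFoldA]
  rw [pv_foldl_range_cast]
  refine congrArg Prod.snd ?_
  apply PySem.List.foldl_congr_mem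
  intro st k _
  rw [pv_foldl_range_cast]
  simp only [PySem.List.pyGetD_natCast]
  rfl

theorem pvInnerA_succ (nums : List Int) (rows : List (PySem.Dict Int Int)) (k t : Nat) (c0 : Int) :
    pvInnerA nums rows k (t+1) c0 = pvStepA nums rows k (pvInnerA nums rows k t c0) t := by
  rw [pvInnerA, pvInnerA, List.range_succ, List.foldl_append, List.foldl_cons, List.foldl_nil]

theorem pvFoldA_succ (nums : List Int) (t : Nat) :
    pvFoldA nums (t+1)
      = ((pvFoldA nums t).1 ++ [(pvInnerA nums (pvFoldA nums t).1 t t (pvFoldA nums t).2).1],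
         (pvInnerA nums (pvFoldA nums t).1 t t (pvFoldA nums t).2).2) := by
  rw [pvFoldA, pvFoldA, List.range_succ, List.foldl_append, List.foldl_cons, List.foldl_nil]

theorem pvInnerA_inv (nums : List Int) (rows : List (PySem.Dict Int Int)) (k : Nat)
    (H : ∀ j, j < k → ∀ d, (rows.getD j PySem.Dict.empty).getD d 0 = pvF nums j d)
    (c0 : Int) (t : Nat) (ht : t ≤ k) :
    (∀ d, (pvInnerA nums rows k t c0).1.getD d 0 = pvFP nums (nums.getD k 0) t d)
    ∧ (pvInnerA nums rows k t c0).2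
      = c0 + ((List.range t).map (fun j => pvF nums j (nums.getD k 0 - nums.getD j 0))).sum := by
  induction t with
  | zero =>
    refine ⟨fun d => ?_, by simp [pvInnerA]⟩
    simp [pvInnerA, pvFP, PySem.Dict.getD_empty]
  | succ u ih =>
    obtain ⟨ih1, ih2⟩ := ih (by omega)
    have hu : u < k := by omega
    rw [pvInnerA_succ]
    constructor
    · intro d
      show ((pvInnerA nums rows k u c0).1.insert (nums.getD k 0 - nums.getD u 0) _).getD d 0 = _
      rw [PySem.Dict.getD_insert, pvFP_succ]
      by_cases hd : d = nums.getD k 0 - nums.getD u 0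
      · rw [if_pos hd, if_pos (by omega), ih1, H u hu, hd]; ring
      · rw [if_neg hd, if_neg (by omega), ih1]; ring
    · show (pvInnerA nums rows k u c0).2 + _ = _
      rw [ih2, H u hu, List.sum_range_succ]
      ring

theorem pvFoldA_inv (nums : List Int) (t : Nat) :
    (pvFoldA nums t).1.length = t
    ∧ (∀ j, j < t → ∀ d, ((pvFoldA nums t).1.getD j PySem.Dict.empty).getD d 0 = pvF nums j d)
    ∧ (pvFoldA nums t).2 = pvCount nums t := by
  induction t with
  | zero => exact ⟨rfl, by omega, by simp [pvCount, pvFoldA]⟩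
  | succ u ih =>
    obtain ⟨ihl, ihr, ihc⟩ := ih
    obtain ⟨hd, hc⟩ := pvInnerA_inv nums (pvFoldA nums u).1 u
      (fun j hj d => ihr j hj d) (pvFoldA nums u).2 u (le_refl u)
    rw [pvFoldA_succ]
    refine ⟨by simp [ihl], ?_, ?_⟩
    · intro j hj d
      by_cases hju : j < u
      · rw [List.getD_append _ _ _ _ (by omega), ihr j hju d]
      · have hju' : j = u := by omega
        subst hju'
        have hlen : ((pvFoldA nums j).1 ++ [(pvInnerA nums (pvFoldA nums j).1 j j (pvFoldA nums j).2).1]).getD j PySem.Dict.empty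
            = (pvInnerA nums (pvFoldA nums j).1 j j (pvFoldA nums j).2).1 := by
          rw [List.getD_append_right _ _ _ _ (by omega)]
          simp [ihl]
        rw [hlen, hd d, ← pvF_eq]
    · rw [hc, ihc, pvCount_succ]

theorem A_eq_count (nums : List Int) : numArithmeticSlices nums = pvCount nums nums.length := by
  rw [A_eq_foldA]
  exact (pvFoldA_inv nums nums.length).2.2

-- ========== B side ==========

-- B's body (the processing of one element x), let-free, and its fold over a prefix of nums
def pvBodyB (st : Int × PySem.Dict Int Int × PySem.Dict (Int × Int) Int) (x : Int) :
    Int × PySem.Dict Int Int × PySem.Dict (Int × Int) Int :=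
  ((st.2.1.items.foldl
      (fun (st2 : Int × PySem.Dict (Int × Int) Int) (vc : Int × Int) =>
        (st2.1 + st2.2.getD (vc.1, x - vc.1) 0,
         st2.2.insert (x, x - vc.1)
           (st2.2.getD (x, x - vc.1) 0 + st2.2.getD (vc.1, x - vc.1) 0 + vc.2)))
      (st.1, st.2.2)).1,
   st.2.1.insert x (st.2.1.getD x 0 + 1),
   (st.2.1.items.foldl
      (fun (st2 : Int × PySem.Dict (Int × Int) Int) (vc : Int × Int) =>
        (st2.1 + st2.2.getD (vc.1, x - vc.1) 0,
         st2.2.insert (x, x - vc.1)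
           (st2.2.getD (x, x - vc.1) 0 + st2.2.getD (vc.1, x - vc.1) 0 + vc.2)))
      (st.1, st.2.2)).2)

def pvFoldB (nums : List Int) (t : Nat) : Int × PySem.Dict Int Int × PySem.Dict (Int × Int) Int :=
  (nums.take t).foldl pvBodyB (0, PySem.Dict.empty, PySem.Dict.empty)

theorem B_eq_foldB (nums : List Int) :
    numArithmeticSlices_alt nums = (pvFoldB nums nums.length).1 := by
  rw [pvFoldB, List.take_length]
  rfl

theorem pvFoldB_succ (nums : List Int) (t : Nat) (ht : t < nums.length) :
    pvFoldB nums (t + 1) = pvBodyB (pvFoldB nums t) (nums.getD t 0) := by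
  rw [pvFoldB, pvFoldB, List.take_add_one, List.getElem?_eq_getElem ht,
    List.getD_eq_getElem nums 0 ht, Option.toList_some, List.foldl_append, List.foldl_cons,
    List.foldl_nil]

theorem pv_sum_pick (K : List Int) (hK : K.Nodup) (a : Int) (ha : a ∈ K) (f : Int → Int) :
    (K.map (fun v => if a = v then f v else 0)).sum = f a := by
  induction K with
  | nil => cases ha
  | cons v rest ih =>
    rw [List.map_cons, List.sum_cons]
    rcases List.mem_cons.mp ha with h1 | h2
    · subst h1
      rw [if_pos rfl]
      have hz : (rest.map (fun v => if a = v then f v else 0)).sum = 0 := by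
        apply List.sum_eq_zero
        intro y hy
        obtain ⟨v', hv', rfl⟩ := List.mem_map.mp hy
        rw [if_neg (by rintro rfl; exact (List.nodup_cons.mp hK).1 hv')]
      rw [hz]; ring
    · have hav : a ≠ v := by rintro rfl; exact (List.nodup_cons.mp hK).1 h2
      rw [if_neg hav, ih (List.nodup_cons.mp hK).2 h2]; ring

theorem pv_regroup (nums : List Int) (x : Int) (t : Nat) (K : List Int) (hK : K.Nodup)
    (hmem : ∀ j, j < t → nums.getD j 0 ∈ K) :
    (K.map (fun v => pvW nums t v (x - v))).sum
      = ((List.range t).map (fun j => pvF nums j (x - nums.getD j 0))).sum := by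
  induction t with
  | zero => simp [pvW]
  | succ u ih =>
    calc (K.map (fun v => pvW nums (u+1) v (x - v))).sum
        = (K.map (fun v => pvW nums u v (x - v)
            + (if nums.getD u 0 = v then pvF nums u (x - v) else 0))).sum := by
          congr 1; exact List.map_congr_left (fun v _ => pvW_succ nums u v (x - v))
      _ = (K.map (fun v => pvW nums u v (x - v))).sum
            + (K.map (fun v => if nums.getD u 0 = v then pvF nums u (x - v) else 0)).sum :=
          PySem.List.sum_map_add_int K _ _
      _ = ((List.range (u+1)).map (fun j => pvF nums j (x - nums.getD j 0))).sum := by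
          rw [ih (fun j hj => hmem j (by omega)),
            pv_sum_pick K hK (nums.getD u 0) (hmem u (by omega)), List.sum_range_succ]

-- pvF at index t, read off from the two aggregates B consults
theorem pv_pvF_split (nums : List Int) (t : Nat) (d : Int) :
    pvF nums t d = pvW nums t (nums.getD t 0 - d) d + pvC nums t (nums.getD t 0 - d) := by
  rw [pvF_eq, pvFP, pvW, pvC, ← PySem.List.sum_map_add_int]
  congr 1
  apply List.map_congr_left
  intro j _
  by_cases h : nums.getD j 0 = nums.getD t 0 - d
  · rw [if_pos (by omega), if_pos h, if_pos h]
  · rw [if_neg (by omega), if_neg h, if_neg h]; ring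

theorem pv_pvW_zero (nums : List Int) (t : Nat) (v d : Int)
    (h : ¬ ∃ j, j < t ∧ nums.getD j 0 = v) : pvW nums t v d = 0 := by
  apply List.sum_eq_zero
  intro y hy
  obtain ⟨j, hj, rfl⟩ := List.mem_map.mp hy
  rw [if_neg (fun hc => h ⟨j, List.mem_range.mp hj, hc⟩)]

theorem pv_pvC_zero (nums : List Int) (t : Nat) (v : Int)
    (h : ¬ ∃ j, j < t ∧ nums.getD j 0 = v) : pvC nums t v = 0 := by
  apply List.sum_eq_zero
  intro y hy
  obtain ⟨j, hj, rfl⟩ := List.mem_map.mp hy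
  rw [if_neg (fun hc => h ⟨j, List.mem_range.mp hj, hc⟩)]

-- invariant of B's inner loop over the (remaining) distinct keys
theorem pvInnerB_inv (nums : List Int) (t : Nat) (x : Int) (C : Int → Int) :
    ∀ (K : List Int), K.Nodup →
    ∀ (c : Int) (w : PySem.Dict (Int × Int) Int),
    (∀ v ∈ K, w.getD (v, x - v) 0 = pvW nums t v (x - v)) →
    (∀ v ∈ K, w.getD (x, x - v) 0 = pvW nums t x (x - v)) →
    (K.foldl
      (fun (st2 : Int × PySem.Dict (Int × Int) Int) (v : Int) =>
        (st2.1 + st2.2.getD (v, x - v) 0,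
         st2.2.insert (x, x - v) (st2.2.getD (x, x - v) 0 + st2.2.getD (v, x - v) 0 + C v)))
      (c, w)).1 = c + (K.map (fun v => pvW nums t v (x - v))).sum
    ∧ ∀ v' d', (K.foldl
      (fun (st2 : Int × PySem.Dict (Int × Int) Int) (v : Int) =>
        (st2.1 + st2.2.getD (v, x - v) 0,
         st2.2.insert (x, x - v) (st2.2.getD (x, x - v) 0 + st2.2.getD (v, x - v) 0 + C v)))
      (c, w)).2.getD (v', d') 0 =
        if v' = x ∧ (x - d') ∈ K then pvW nums t x d' + pvW nums t (x - d') d' + C (x - d')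
        else w.getD (v', d') 0 := by
  intro K
  induction K with
  | nil =>
    intro _ c w _ _
    exact ⟨by simp, fun v' d' => by simp⟩
  | cons v rest ih =>
    intro hK c w H1 H2
    obtain ⟨hvr, hrest⟩ := List.nodup_cons.mp hK
    rw [List.foldl_cons]
    have hw1 : ∀ v' ∈ rest,
        (w.insert (x, x - v) (w.getD (x, x - v) 0 + w.getD (v, x - v) 0 + C v)).getD (v', x - v') 0
          = w.getD (v', x - v') 0 := by
      intro v' hv'
      rw [PySem.Dict.getD_insert, if_neg]
      intro hc
      have h1 : v' = x := congrArg Prod.fst hc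
      have h2 : x - v' = x - v := congrArg Prod.snd hc
      have : v' = v := by omega
      exact hvr (this ▸ hv')
    have hw2 : ∀ v' ∈ rest,
        (w.insert (x, x - v) (w.getD (x, x - v) 0 + w.getD (v, x - v) 0 + C v)).getD (x, x - v') 0
          = w.getD (x, x - v') 0 := by
      intro v' hv'
      rw [PySem.Dict.getD_insert, if_neg]
      intro hc
      have h2 : x - v' = x - v := congrArg Prod.snd hc
      have : v' = v := by omega
      exact hvr (this ▸ hv')
    obtain ⟨ihc, ihw⟩ := ih hrest (c + w.getD (v, x - v) 0)
      (w.insert (x, x - v) (w.getD (x, x - v) 0 + w.getD (v, x - v) 0 + C v))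
      (fun v' hv' => by rw [hw1 v' hv']; exact H1 v' (List.mem_cons_of_mem v hv'))
      (fun v' hv' => by rw [hw2 v' hv']; exact H2 v' (List.mem_cons_of_mem v hv'))
    constructor
    · show (List.foldl _ (c + w.getD (v, x - v) 0,
        w.insert (x, x - v) (w.getD (x, x - v) 0 + w.getD (v, x - v) 0 + C v)) rest).1 = _
      rw [ihc, H1 v List.mem_cons_self, List.map_cons, List.sum_cons]
      ring
    · intro v' d'
      show (List.foldl _ (c + w.getD (v, x - v) 0,
        w.insert (x, x - v) (w.getD (x, x - v) 0 + w.getD (v, x - v) 0 + C v)) rest).2.getD (v', d') 0 = _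
      rw [ihw v' d']
      by_cases hmain : v' = x ∧ (x - d') ∈ rest
      · rw [if_pos hmain, if_pos ⟨hmain.1, List.mem_cons_of_mem v hmain.2⟩]
      · rw [if_neg hmain]
        by_cases hv2 : v' = x ∧ x - d' = v
        · have hd' : d' = x - v := by omega
          subst hd'
          rw [PySem.Dict.getD_insert, if_pos (by rw [hv2.1]),
            if_pos ⟨hv2.1, List.mem_cons.mpr (Or.inl hv2.2)⟩,
            H1 v List.mem_cons_self, H2 v List.mem_cons_self, hv2.2]
        · rw [PySem.Dict.getD_insert, if_neg, if_neg]
          · intro hcc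
            rcases List.mem_cons.mp hcc.2 with h1 | h2
            · exact hv2 ⟨hcc.1, h1⟩
            · exact hmain ⟨hcc.1, h2⟩
          · intro hc
            have h1 : v' = x := congrArg Prod.fst hc
            have h2 : d' = x - v := congrArg Prod.snd hc
            exact hv2 ⟨h1, by omega⟩

theorem pvFoldB_inv (nums : List Int) (t : Nat) (ht : t ≤ nums.length) :
    (pvFoldB nums t).1 = pvCount nums t
    ∧ (∀ v, (pvFoldB nums t).2.1.getD v 0 = pvC nums t v)
    ∧ (pvFoldB nums t).2.1.keys.Nodup
    ∧ (∀ v, v ∈ (pvFoldB nums t).2.1.keys ↔ ∃ j, j < t ∧ nums.getD j 0 = v)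
    ∧ (∀ v d, (pvFoldB nums t).2.2.getD (v, d) 0 = pvW nums t v d) := by
  induction t with
  | zero =>
    refine ⟨by simp [pvFoldB, pvCount], fun v => by simp [pvFoldB, pvC, PySem.Dict.getD_empty],
      by simp [pvFoldB, PySem.Dict.keys_empty], fun v => ?_,
      fun v d => by simp [pvFoldB, pvW, PySem.Dict.getD_empty]⟩
    simp [pvFoldB, PySem.Dict.keys_empty]
  | succ u ih =>
    obtain ⟨ihc, ihv, ihn, ihm, ihw⟩ := ih (by omega)
    have hu : u < nums.length := by omega
    rw [pvFoldB_succ nums u hu]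
    set x := nums.getD u 0 with hx
    set st := pvFoldB nums u with hst
    obtain ⟨hic, hiw⟩ := pvInnerB_inv nums u x (fun v => st.2.1.getD v 0) st.2.1.keys ihn
      st.1 st.2.2 (fun v _ => ihw v (x - v)) (fun v _ => ihw x (x - v))
    have hitems : st.2.1.items = st.2.1.keys.map (fun v => (v, st.2.1.getD v 0)) :=
      PySem.Dict.items_eq_map_keys st.2.1 ihn 0
    have hbody : pvBodyB st x =
        ((st.2.1.keys.foldl
          (fun (st2 : Int × PySem.Dict (Int × Int) Int) (v : Int) =>
            (st2.1 + st2.2.getD (v, x - v) 0,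
             st2.2.insert (x, x - v) (st2.2.getD (x, x - v) 0 + st2.2.getD (v, x - v) 0
               + st.2.1.getD v 0)))
          (st.1, st.2.2)).1,
         st.2.1.insert x (st.2.1.getD x 0 + 1),
         (st.2.1.keys.foldl
          (fun (st2 : Int × PySem.Dict (Int × Int) Int) (v : Int) =>
            (st2.1 + st2.2.getD (v, x - v) 0,
             st2.2.insert (x, x - v) (st2.2.getD (x, x - v) 0 + st2.2.getD (v, x - v) 0
               + st.2.1.getD v 0)))
          (st.1, st.2.2)).2) := by
      rw [pvBodyB, hitems, List.foldl_map]
    rw [hbody]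
    refine ⟨?_, ?_, PySem.Dict.nodup_keys_insert _ _ _ ihn, ?_, ?_⟩
    · -- count
      rw [hic, ihc, pv_regroup nums x u st.2.1.keys ihn
          (fun j hj => (ihm (nums.getD j 0)).mpr ⟨j, hj, rfl⟩), pvCount_succ, ← hx]
    · -- values dict
      intro v
      rw [PySem.Dict.getD_insert, pvC_succ, ← hx]
      by_cases hv : v = x
      · rw [if_pos hv, ihv, if_pos (by omega), hv]
      · rw [if_neg hv, ihv, if_neg (by omega)]; ring
    · -- membership
      intro v
      rw [PySem.Dict.mem_keys_insert, ihm v]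
      constructor
      · rintro (rfl | ⟨j, hj, hje⟩)
        · exact ⟨u, by omega, rfl⟩
        · exact ⟨j, by omega, hje⟩
      · rintro ⟨j, hj, hje⟩
        by_cases hju : j = u
        · subst hju; exact Or.inl hje.symm
        · exact Or.inr ⟨j, by omega, hje⟩
    · -- weak dict
      intro v d
      rw [hiw v d, pvW_succ, ← hx]
      by_cases hvx : v = x
      · subst hvx
        rw [if_pos rfl]
        by_cases hk : (x - d) ∈ st.2.1.keys
        · rw [if_pos ⟨rfl, hk⟩, ihv (x - d), pv_pvF_split nums u d, ← hx]
          ring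
        · rw [if_neg (fun hcc => hk hcc.2), pv_pvF_split nums u d, ← hx,
            pv_pvW_zero nums u (x - d) d (fun hex => hk ((ihm (x - d)).mpr hex)),
            pv_pvC_zero nums u (x - d) (fun hex => hk ((ihm (x - d)).mpr hex)), ihw x d]
          ring
      · rw [if_neg (fun hcc => hvx hcc.1), ihw v d, if_neg (fun hcc => hvx hcc.symm)]
        ring

theorem B_eq_count (nums : List Int) : numArithmeticSlices_alt nums = pvCount nums nums.length := by
  rw [B_eq_foldB]
  exact (pvFoldB_inv nums nums.length (le_refl _)).1

-- ===== VERDICT (by name: the statement is the Claim_ definition above) =====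
theorem numArithmeticSlices_spec : Claim_equal_numArithmeticSlices := by
  intro nums _
  show numArithmeticSlices nums = numArithmeticSlices_alt nums
  rw [A_eq_count, B_eq_count]
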